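-- pv_equiv track=rewrite | github.com/ipi8/sudoku | sudokuPlay.py | getBlockRegion
-- ===== SOURCE A (Python) =====
-- def getBlockRegion(block):
--     L = []
--     br = block // 3
--     bc = block % 3
--     for row in range(3*br, 3*br+3):
--         for col in range(3*bc, 3*bc+3):
--             L.append((row, col))
--     return L
-- ===== SOURCE B (Python) =====
-- def getBlockRegion(block):
--     br, bc = divmod(block, 3)
--     r0, c0 = 3 * br, 3 * bc
--     return [(r0 + q, c0 + r) for q, r in (divmod(i, 3) for i in range(9))]
-- ===== Notes on version B (the rewrite author's own statement) =====
-- stated objective: alternative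
-- what changed: Replaces the two nested row/col loops with a single flat pass over range(9), recovering the in-block position by divmod(i,3) and adding it to the block's base offsets.
import Mathlib
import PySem

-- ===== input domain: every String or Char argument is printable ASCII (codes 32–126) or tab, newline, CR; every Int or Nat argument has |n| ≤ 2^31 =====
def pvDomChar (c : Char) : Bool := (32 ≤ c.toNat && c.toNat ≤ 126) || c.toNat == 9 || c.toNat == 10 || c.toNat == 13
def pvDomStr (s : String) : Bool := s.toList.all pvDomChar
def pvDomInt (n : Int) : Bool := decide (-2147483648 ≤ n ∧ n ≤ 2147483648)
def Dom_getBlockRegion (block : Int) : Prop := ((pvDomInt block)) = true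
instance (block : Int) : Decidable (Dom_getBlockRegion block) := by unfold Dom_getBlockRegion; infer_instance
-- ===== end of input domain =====

-- B flattens the two nested 3x3 loops of A into one pass over range(9) with divmod(i,3) (objective: alternative decomposition).
-- ===== PORT A =====
def getBlockRegion (block : Int) : List (Int × Int) :=
  let br := PySem.Int.floordiv block 3
  let bc := PySem.Int.mod block 3
  (PySem.List.pyRange (3*br) (3*br+3) 1).foldl (fun L row =>
    (PySem.List.pyRange (3*bc) (3*bc+3) 1).foldl (fun L col => L ++ [(row, col)]) L) []

-- ===== PORT B =====
def getBlockRegion_alt (block : Int) : List (Int × Int) :=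
  let br := PySem.Int.floordiv block 3
  let bc := PySem.Int.mod block 3
  let r0 := 3*br
  let c0 := 3*bc
  (PySem.List.pyRange 0 9 1).map (fun i => (r0 + PySem.Int.floordiv i 3, c0 + PySem.Int.mod i 3))

-- ===== PRECONDITION & SPEC =====
def Spec_getBlockRegion (block : Int) (out : List (Int × Int)) : Prop := out = getBlockRegion_alt block
instance (block : Int) (out : List (Int × Int)) : Decidable (Spec_getBlockRegion block out) := by unfold Spec_getBlockRegion; infer_instance

-- ===== CLAIM (what is proved, stated in full; the proofs are below) =====
def Claim_equal_getBlockRegion : Prop := ∀ (block : Int), Dom_getBlockRegion block → Spec_getBlockRegion block (getBlockRegion block)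

-- ===== LEMMAS AND PROOFS =====

-- ===== VERDICT (by name: the statement is the Claim_ definition above) =====
lemma pyRange_three (a : Int) : PySem.List.pyRange a (a+3) 1 = [a, a+1, a+2] := by
  rw [PySem.List.pyRange_one_cons (by omega), PySem.List.pyRange_one_cons (by omega),
      PySem.List.pyRange_one_cons (by omega), PySem.List.pyRange_one_eq_nil (by omega)]
  norm_num
  omega

theorem getBlockRegion_spec : Claim_equal_getBlockRegion := by
  intro block _
  unfold Spec_getBlockRegion getBlockRegion getBlockRegion_alt
  generalize PySem.Int.floordiv block 3 = br
  generalize PySem.Int.mod block 3 = bc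
  simp only [pyRange_three]
  norm_num [PySem.List.pyRange, PySem.Int.floordiv, PySem.Int.mod, List.foldl]
  simp only [show Int.toNat 9 = 9 from rfl, List.range_succ, List.map_append, List.map,
    List.append_assoc, List.nil_append, List.cons_append, Function.comp]
  norm_num [Int.fdiv, Int.fmod]
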